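-- pv_equiv track=rewrite | github.com/pirua-game/gdep | gdep-cli/gdep/ue5_flow.py | _masked_body
-- ===== SOURCE A (Python) =====
-- _DELEGATE_FUNC_NAMES = {
--     "BindAction", "BindDelegate", "BindAxis", "BindUFunction",
--     "AddDynamic", "AddUFunction", "AddWeakLambda", "AddLambda",
--     "RemoveDynamic", "BindRaw",
-- }
--
-- def _balanced_paren_end(text, start):
--     assert text[start] == '('
--     depth = 0
--     for i in range(start, len(text)):
--         if text[i] == '(':
--             depth += 1
--         elif text[i] == ')':
--             depth -= 1
--             if depth == 0:
--                 return i
--     return len(text) - 1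
--
-- def _masked_body(body):
--     result = list(body)
--     i = 0
--     n = len(body)
--     while i < n:
--         for fname in _DELEGATE_FUNC_NAMES:
--             fl = len(fname)
--             if body[i:i+fl] == fname:
--                 j = i + fl
--                 while j < n and body[j] in ' \t':
--                     j += 1
--                 if j < n and body[j] == '(':
--                     end = _balanced_paren_end(body, j)
--                     for k in range(i, end + 1):
--                         result[k] = ' '
--                     i = end + 1
--                     break
--         else:
--             i += 1
--     return ''.join(result)
-- ===== SOURCE B (Python) =====
-- import re
--
-- _DELEGATE_FUNC_NAMES = {
--     "BindAction", "BindDelegate", "BindAxis", "BindUFunction",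
--     "AddDynamic", "AddUFunction", "AddWeakLambda", "AddLambda",
--     "RemoveDynamic", "BindRaw",
-- }
--
-- def _balanced_paren_end(text, start):
--     assert text[start] == '('
--     depth = 0
--     for i in range(start, len(text)):
--         if text[i] == '(':
--             depth += 1
--         elif text[i] == ')':
--             depth -= 1
--             if depth == 0:
--                 return i
--     return len(text) - 1
--
-- _PATTERN = re.compile("|".join(re.escape(name) for name in sorted(_DELEGATE_FUNC_NAMES)))
--
-- def _masked_body(body):
--     result = list(body)
--     n = len(body)
--     pos = 0
--     while pos < n:
--         m = _PATTERN.search(body, pos)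
--         if m is None:
--             break
--         j = m.end()
--         while j < n and body[j] in ' \t':
--             j += 1
--         if j < n and body[j] == '(':
--             end = _balanced_paren_end(body, j)
--             result[m.start():end + 1] = ' ' * (end + 1 - m.start())
--             pos = end + 1
--         else:
--             pos = m.start() + 1
--     return ''.join(result)
-- ===== Notes on version B (the rewrite author's own statement) =====
-- stated objective: faster
-- what changed: A tests every delegate name at every character index; B compiles the names into one regex alternation and repeatedly searches for the next candidate occurrence, jumping between matches and blanking matched call spans by slice assignment instead of per-index writes.
import Mathlib
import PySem

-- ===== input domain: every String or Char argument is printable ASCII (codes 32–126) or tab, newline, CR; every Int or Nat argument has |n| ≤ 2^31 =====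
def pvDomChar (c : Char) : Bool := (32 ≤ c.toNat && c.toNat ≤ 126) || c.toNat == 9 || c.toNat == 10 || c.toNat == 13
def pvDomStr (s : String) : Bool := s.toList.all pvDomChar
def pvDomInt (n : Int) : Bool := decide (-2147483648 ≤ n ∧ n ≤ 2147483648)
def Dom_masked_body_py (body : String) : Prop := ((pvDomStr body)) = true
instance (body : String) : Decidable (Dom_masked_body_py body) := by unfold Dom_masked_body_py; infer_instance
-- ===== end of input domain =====

-- B replaces A's test-all-names-at-every-index scan by a regex-alternation search that jumps
-- straight to the next candidate name occurrence and blanks by slice splicing (measured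
-- constant-factor speedup; same asymptotics).

-- The delegate-name set, shared by both Pythons (a Python set literal of distinct strings; its
-- iteration order is irrelevant because no two names can match at the same position, see
-- names_pairwise below).
def delegateNames : List (List Char) :=
  ["BindAction".toList, "BindDelegate".toList, "BindAxis".toList, "BindUFunction".toList,
   "AddDynamic".toList, "AddUFunction".toList, "AddWeakLambda".toList, "AddLambda".toList,
   "RemoveDynamic".toList, "BindRaw".toList]

-- _balanced_paren_end, a module helper shared by both Pythons (B reuses it unchanged)
def bpeAux (text : List Char) (i : Nat) (depth : Int) : Nat :=
  if h : i < text.length then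
    if text[i] = '(' then bpeAux text (i+1) (depth+1)
    else if text[i] = ')' then
      (if depth - 1 = 0 then i else bpeAux text (i+1) (depth-1))
    else bpeAux text (i+1) depth
  else text.length - 1
termination_by text.length - i
decreasing_by
  · exact Nat.sub_succ_lt_self _ _ h
  · exact Nat.sub_succ_lt_self _ _ h
  · exact Nat.sub_succ_lt_self _ _ h

-- the `while j < n and body[j] in ' \t': j += 1` loop (textually present in both Pythons)
def skipWs (body : List Char) (j : Nat) : Nat :=
  if h : j < body.length then
    if body[j] = ' ' ∨ body[j] = '\t' then skipWs body (j+1) else j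
  else j
termination_by body.length - j
decreasing_by exact Nat.sub_succ_lt_self _ _ h

-- bounds on the two shared helpers (cited by the ports' termination proofs)
theorem bpeAux_oob (text : List Char) (i : Nat) (depth : Int) (h : ¬ i < text.length) :
    bpeAux text i depth = text.length - 1 := by
  unfold bpeAux; rw [dif_neg h]

theorem bpeAux_ge (text : List Char) (i : Nat) (depth : Int) (hi : i < text.length) :
    i ≤ bpeAux text i depth := by
  induction i, depth using bpeAux.induct text with
  | case1 i depth h hc ih =>
    unfold bpeAux; rw [dif_pos h, if_pos hc]
    by_cases h' : i + 1 < text.length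
    · exact le_trans (Nat.le_succ i) (ih h')
    · rw [bpeAux_oob text _ _ h']; exact Nat.le_pred_of_lt h
  | case2 i depth h hc1 hc2 hd =>
    unfold bpeAux; rw [dif_pos h, if_neg hc1, if_pos hc2, if_pos hd]
  | case3 i depth h hc1 hc2 hd ih =>
    unfold bpeAux; rw [dif_pos h, if_neg hc1, if_pos hc2, if_neg hd]
    by_cases h' : i + 1 < text.length
    · exact le_trans (Nat.le_succ i) (ih h')
    · rw [bpeAux_oob text _ _ h']; exact Nat.le_pred_of_lt h
  | case4 i depth h hc1 hc2 ih =>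
    unfold bpeAux; rw [dif_pos h, if_neg hc1, if_neg hc2]
    by_cases h' : i + 1 < text.length
    · exact le_trans (Nat.le_succ i) (ih h')
    · rw [bpeAux_oob text _ _ h']; exact Nat.le_pred_of_lt h
  | case5 i depth h => exact absurd hi h

theorem bpeAux_lt (text : List Char) (i : Nat) (depth : Int) (hi : i < text.length) :
    bpeAux text i depth < text.length := by
  induction i, depth using bpeAux.induct text with
  | case1 i depth h hc ih =>
    unfold bpeAux; rw [dif_pos h, if_pos hc]
    by_cases h' : i + 1 < text.length
    · exact ih h'
    · rw [bpeAux_oob text _ _ h']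
      exact Nat.sub_lt (Nat.lt_of_le_of_lt (Nat.zero_le i) h) Nat.one_pos
  | case2 i depth h hc1 hc2 hd =>
    unfold bpeAux; rw [dif_pos h, if_neg hc1, if_pos hc2, if_pos hd]; exact h
  | case3 i depth h hc1 hc2 hd ih =>
    unfold bpeAux; rw [dif_pos h, if_neg hc1, if_pos hc2, if_neg hd]
    by_cases h' : i + 1 < text.length
    · exact ih h'
    · rw [bpeAux_oob text _ _ h']
      exact Nat.sub_lt (Nat.lt_of_le_of_lt (Nat.zero_le i) h) Nat.one_pos
  | case4 i depth h hc1 hc2 ih =>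
    unfold bpeAux; rw [dif_pos h, if_neg hc1, if_neg hc2]
    by_cases h' : i + 1 < text.length
    · exact ih h'
    · rw [bpeAux_oob text _ _ h']
      exact Nat.sub_lt (Nat.lt_of_le_of_lt (Nat.zero_le i) h) Nat.one_pos
  | case5 i depth h => exact absurd hi h

theorem skipWs_ge (body : List Char) (j : Nat) : j ≤ skipWs body j := by
  induction j using skipWs.induct body with
  | case1 j h hc ih => unfold skipWs; rw [dif_pos h, if_pos hc]; exact le_trans (Nat.le_succ j) ih
  | case2 j h hc => unfold skipWs; rw [dif_pos h, if_neg hc]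
  | case3 j h => unfold skipWs; rw [dif_neg h]

-- ===== PORT A =====
-- A's inner `for fname in _DELEGATE_FUNC_NAMES: …` loop at position i (some e = "break with end e";
-- Python's local j = skipWs body (i + fname.length) is inlined)
def tryNames (body : List Char) (i : Nat) : List (List Char) → Option Nat
  | [] => none
  | fname :: rest =>
    if (body.drop i).take fname.length = fname then
      if hj : skipWs body (i + fname.length) < body.length then
        if body[skipWs body (i + fname.length)] = '(' then
          some (bpeAux body (skipWs body (i + fname.length)) 0)
        else tryNames body i rest
      else tryNames body i rest
    else tryNames body i rest

theorem tryNames_gt (body : List Char) (i : Nat) :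
    ∀ names : List (List Char), (∀ f ∈ names, f ≠ ([] : List Char)) →
      ∀ e, tryNames body i names = some e → i < e ∧ e < body.length := by
  intro names
  induction names with
  | nil => intro _ e he; simp [tryNames] at he
  | cons f rest ih =>
    intro hne e he
    unfold tryNames at he
    split_ifs at he with h1 h2 h3
    · have hf : 0 < f.length :=
        Nat.pos_of_ne_zero (fun h0 => hne f (by simp) (List.length_eq_zero_iff.mp h0))
      injection he with he'
      rw [← he']
      refine ⟨Nat.lt_of_lt_of_le (Nat.lt_add_of_pos_right hf) ?_,
              bpeAux_lt body (skipWs body (i + f.length)) 0 h2⟩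
      exact le_trans (skipWs_ge body (i + f.length))
        (bpeAux_ge body (skipWs body (i + f.length)) 0 h2)
    · exact ih (fun g hg => hne g (by simp [hg])) e he
    · exact ih (fun g hg => hne g (by simp [hg])) e he
    · exact ih (fun g hg => hne g (by simp [hg])) e he

-- A's outer `while i < n` loop over (result, i)
def loopA (body result : List Char) (i : Nat) : List Char :=
  if hi : i < body.length then
    match he : tryNames body i delegateNames with
    | some e =>
        loopA body ((List.range' i (e + 1 - i)).foldl (fun r k => r.set k ' ') result) (e + 1)
    | none => loopA body result (i + 1)
  else result
termination_by body.length - i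
decreasing_by
  · exact Nat.sub_lt_sub_left hi
      (Nat.lt_succ_of_lt (tryNames_gt body i delegateNames (by decide) e he).1)
  · exact Nat.sub_succ_lt_self _ _ hi

def masked_body_py (body : String) : String :=
  String.ofList (loopA body.toList body.toList 0)

-- ===== PORT B =====
-- the compiled regex alternation: first name of the pattern matching at position i (match end)
def matchAt (body : List Char) (i : Nat) : List (List Char) → Option Nat
  | [] => none
  | f :: rest =>
    if (body.drop i).take f.length = f then some (i + f.length) else matchAt body i rest

-- pattern.search(body, pos): leftmost match at a position ≥ pos, as (start, end)
def findNext (body : List Char) (pos : Nat) : Option (Nat × Nat) :=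
  if h : pos < body.length then
    match matchAt body pos delegateNames with
    | some e => some (pos, e)
    | none => findNext body (pos + 1)
  else none
termination_by body.length - pos
decreasing_by exact Nat.sub_succ_lt_self _ _ h

theorem matchAt_ge (body : List Char) (i : Nat) :
    ∀ names j0, matchAt body i names = some j0 → i ≤ j0 := by
  intro names
  induction names with
  | nil => intro j0 h; simp [matchAt] at h
  | cons f rest ih =>
    intro j0 h
    unfold matchAt at h
    split_ifs at h
    · injection h with h'; rw [← h']; exact Nat.le_add_right i f.length
    · exact ih j0 h

theorem findNext_ge (body : List Char) :
    ∀ pos s j0, findNext body pos = some (s, j0) → pos ≤ s ∧ s ≤ j0 ∧ s < body.length := by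
  intro pos
  induction pos using findNext.induct body with
  | case1 pos h e hm =>
    intro s j0 hf
    unfold findNext at hf
    rw [dif_pos h, hm] at hf
    simp only [Option.some.injEq, Prod.mk.injEq] at hf
    obtain ⟨rfl, rfl⟩ := hf
    exact ⟨le_refl _, matchAt_ge body pos delegateNames _ hm, h⟩
  | case2 pos h hm ih =>
    intro s j0 hf
    unfold findNext at hf
    rw [dif_pos h, hm] at hf
    obtain ⟨ha, hb, hc⟩ := ih s j0 hf
    exact ⟨le_trans (Nat.le_succ pos) ha, hb, hc⟩
  | case3 pos h =>
    intro s j0 hf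
    unfold findNext at hf
    rw [dif_neg h] at hf
    exact absurd hf (by simp)

-- B's `while pos < n` loop driven by pattern.search (j = skipWs body j0 inlined)
def loopB (body result : List Char) (pos : Nat) : List Char :=
  if hp : pos < body.length then
    match hf : findNext body pos with
    | none => result
    | some (s, j0) =>
      if hj : skipWs body j0 < body.length then
        if body[skipWs body j0] = '(' then
          loopB body
            (result.take s ++ List.replicate (bpeAux body (skipWs body j0) 0 + 1 - s) ' '
              ++ result.drop (bpeAux body (skipWs body j0) 0 + 1))
            (bpeAux body (skipWs body j0) 0 + 1)
        else loopB body result (s + 1)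
      else loopB body result (s + 1)
  else result
termination_by body.length - pos
decreasing_by
  · obtain ⟨h1, h2, _⟩ := findNext_ge body pos s j0 hf
    exact Nat.sub_lt_sub_left hp (Nat.lt_succ_of_le (le_trans h1 (le_trans h2
      (le_trans (skipWs_ge body j0) (bpeAux_ge body (skipWs body j0) 0 hj)))))
  · exact Nat.sub_lt_sub_left hp (Nat.lt_succ_of_le (findNext_ge body pos s j0 hf).1)
  · exact Nat.sub_lt_sub_left hp (Nat.lt_succ_of_le (findNext_ge body pos s j0 hf).1)

def masked_body_py_alt (body : String) : String :=
  String.ofList (loopB body.toList body.toList 0)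

-- ===== PRECONDITION & SPEC =====
def Spec_masked_body_py (body : String) (out : String) : Prop := out = masked_body_py_alt body
instance (body : String) (out : String) : Decidable (Spec_masked_body_py body out) := by unfold Spec_masked_body_py; infer_instance

-- ===== CLAIM (what is proved, stated in full; the proofs are below) =====
def Claim_equal_masked_body_py : Prop := ∀ (body : String), Dom_masked_body_py body → Spec_masked_body_py body (masked_body_py body)

-- ===== LEMMAS AND PROOFS =====

-- no delegate name is a prefix of another, so no two names can match at the same position
theorem names_pairwise :
    delegateNames.Pairwise (fun a b => ¬ a <+: b ∧ ¬ b <+: a) := by decide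

theorem tryNames_none_of_noMatch (body : List Char) (i : Nat) :
    ∀ names : List (List Char), (∀ f ∈ names, (body.drop i).take f.length ≠ f) →
      tryNames body i names = none := by
  intro names
  induction names with
  | nil => intro _; rfl
  | cons f rest ih =>
    intro h
    unfold tryNames
    rw [if_neg (h f (by simp))]
    exact ih (fun g hg => h g (by simp [hg]))

theorem tryNames_of_matchAt_none (body : List Char) (i : Nat) :
    ∀ names : List (List Char), matchAt body i names = none →
      tryNames body i names = none := by
  intro names
  induction names with
  | nil => intro _; rfl
  | cons f rest ih =>
    intro h
    unfold matchAt at h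
    split_ifs at h with h1
    · unfold tryNames; rw [if_neg h1]; exact ih h

theorem tryNames_of_matchAt_some (body : List Char) (i : Nat) :
    ∀ names : List (List Char),
      names.Pairwise (fun a b => ¬ a <+: b ∧ ¬ b <+: a) →
      ∀ j0, matchAt body i names = some j0 →
      tryNames body i names =
        (if hj : skipWs body j0 < body.length then
          (if body[skipWs body j0]'hj = '(' then some (bpeAux body (skipWs body j0) 0) else none)
        else none) := by
  intro names
  induction names with
  | nil => intro _ j0 h; simp [matchAt] at h
  | cons f rest ih =>
    intro hpw j0 hm
    rw [List.pairwise_cons] at hpw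
    unfold matchAt at hm
    split_ifs at hm with h1
    · simp only [Option.some.injEq] at hm
      subst hm
      have hfp : f <+: body.drop i := by
        rw [List.prefix_iff_eq_take]; exact h1.symm
      have hrest : tryNames body i rest = none := by
        apply tryNames_none_of_noMatch
        intro g hg hgeq
        have hgp : g <+: body.drop i := by
          rw [List.prefix_iff_eq_take]; exact hgeq.symm
        rcases List.prefix_or_prefix_of_prefix hfp hgp with h | h
        · exact (hpw.1 g hg).1 h
        · exact (hpw.1 g hg).2 h
      unfold tryNames
      rw [if_pos h1]
      split_ifs with h2 h3
      · rfl
      · exact hrest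
      · exact hrest
    · unfold tryNames
      rw [if_neg h1]
      exact ih hpw.2 j0 hm

theorem findNext_oob (body : List Char) (pos : Nat) (h : ¬ pos < body.length) :
    findNext body pos = none := by
  unfold findNext; rw [dif_neg h]

theorem findNext_at (body : List Char) (pos : Nat) (h : pos < body.length)
    (j0 : Nat) (hm : matchAt body pos delegateNames = some j0) :
    findNext body pos = some (pos, j0) := by
  unfold findNext; rw [dif_pos h, hm]

theorem findNext_step (body : List Char) (pos : Nat) (h : pos < body.length)
    (hm : matchAt body pos delegateNames = none) :
    findNext body pos = findNext body (pos + 1) := by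
  conv_lhs => rw [findNext.eq_def]
  rw [dif_pos h, hm]

-- one-step unfolding lemmas for the two loops
theorem loopA_oob (body r : List Char) (i : Nat) (hi : ¬ i < body.length) :
    loopA body r i = r := by
  rw [loopA.eq_def, dif_neg hi]

theorem loopA_none (body r : List Char) (i : Nat) (hi : i < body.length)
    (ht : tryNames body i delegateNames = none) :
    loopA body r i = loopA body r (i + 1) := by
  conv_lhs => rw [loopA.eq_def]
  rw [dif_pos hi]
  split
  · rename_i e heq; rw [ht] at heq; cases heq
  · rfl

theorem loopA_some (body r : List Char) (i e : Nat) (hi : i < body.length)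
    (ht : tryNames body i delegateNames = some e) :
    loopA body r i
      = loopA body ((List.range' i (e + 1 - i)).foldl (fun a k => a.set k ' ') r) (e + 1) := by
  conv_lhs => rw [loopA.eq_def]
  rw [dif_pos hi]
  split
  · rename_i e' heq; rw [ht] at heq; cases heq; rfl
  · rename_i heq; rw [ht] at heq; cases heq

theorem loopB_oob (body r : List Char) (pos : Nat) (hp : ¬ pos < body.length) :
    loopB body r pos = r := by
  rw [loopB.eq_def, dif_neg hp]

theorem loopB_none (body r : List Char) (pos : Nat) (hp : pos < body.length)
    (hf : findNext body pos = none) :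
    loopB body r pos = r := by
  conv_lhs => rw [loopB.eq_def]
  rw [dif_pos hp]
  split
  · rfl
  · rename_i s j0 heq; rw [hf] at heq; cases heq

theorem loopB_hit (body r : List Char) (pos s j0 : Nat) (hp : pos < body.length)
    (hf : findNext body pos = some (s, j0)) (hj : skipWs body j0 < body.length)
    (hpar : body[skipWs body j0]'hj = '(') :
    loopB body r pos
      = loopB body
          (r.take s ++ List.replicate (bpeAux body (skipWs body j0) 0 + 1 - s) ' '
            ++ r.drop (bpeAux body (skipWs body j0) 0 + 1))
          (bpeAux body (skipWs body j0) 0 + 1) := by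
  conv_lhs => rw [loopB.eq_def]
  rw [dif_pos hp]
  split
  · rename_i heq; rw [hf] at heq; cases heq
  · rename_i s' j0' heq; rw [hf] at heq; cases heq
    rw [dif_pos hj, if_pos hpar]

theorem loopB_miss_oob (body r : List Char) (pos s j0 : Nat) (hp : pos < body.length)
    (hf : findNext body pos = some (s, j0)) (hj : ¬ skipWs body j0 < body.length) :
    loopB body r pos = loopB body r (s + 1) := by
  conv_lhs => rw [loopB.eq_def]
  rw [dif_pos hp]
  split
  · rename_i heq; rw [hf] at heq; cases heq
  · rename_i s' j0' heq; rw [hf] at heq; cases heq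
    rw [dif_neg hj]

theorem loopB_miss_np (body r : List Char) (pos s j0 : Nat) (hp : pos < body.length)
    (hf : findNext body pos = some (s, j0)) (hj : skipWs body j0 < body.length)
    (hpar : ¬ body[skipWs body j0]'hj = '(') :
    loopB body r pos = loopB body r (s + 1) := by
  conv_lhs => rw [loopB.eq_def]
  rw [dif_pos hp]
  split
  · rename_i heq; rw [hf] at heq; cases heq
  · rename_i s' j0' heq; rw [hf] at heq; cases heq
    rw [dif_pos hj, if_neg hpar]

-- blanking result[i..i+c-1] with A's per-index assignments equals B's slice splice
theorem foldl_set_eq_splice (c : Nat) :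
    ∀ (r : List Char) (i : Nat), i + c ≤ r.length →
      (List.range' i c).foldl (fun a k => a.set k ' ') r
        = r.take i ++ List.replicate c ' ' ++ r.drop (i + c) := by
  induction c with
  | zero => intro r i h; simp
  | succ c ih =>
    intro r i h
    rw [List.range'_succ, List.foldl_cons]
    have hi : i < r.length := by omega
    have hset : r.set i ' ' = r.take i ++ ' ' :: r.drop (i + 1) := by
      rw [List.set_eq_take_append_cons_drop, if_pos hi]
    rw [ih (r.set i ' ') (i + 1) (by simp; omega), hset]
    have hlen : (r.take i).length = i := by simp; omega
    rw [List.take_append, List.drop_append, hlen]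
    have h1 : (r.take i).take (i+1) = r.take i := List.take_of_length_le (by omega)
    have h2 : (' ' :: r.drop (i + 1)).take (i + 1 - i) = [' '] := by
      have : i + 1 - i = 1 := by omega
      rw [this]; rfl
    have h3 : (r.take i).drop (i + 1 + c) = [] := List.drop_eq_nil_of_le (by omega)
    have h4 : (' ' :: r.drop (i + 1)).drop (i + 1 + c - i) = r.drop (i + 1 + c) := by
      have : i + 1 + c - i = 1 + c := by omega
      rw [this, Nat.add_comm 1 c, List.drop_succ_cons, List.drop_drop]
    rw [h1, h2, h3, h4]
    have : i + (c+1) = i + 1 + c := by omega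
    rw [this, List.replicate_succ]
    simp

-- main loop correspondence: A's scan and B's search-driven loop compute the same result
theorem loop_eq (body : List Char) :
    ∀ (k i : Nat) (r : List Char), body.length - i ≤ k → r.length = body.length →
      loopA body r i = loopB body r i := by
  intro k
  induction k with
  | zero =>
    intro i r hk hr
    have hi : ¬ i < body.length := by omega
    rw [loopA_oob body r i hi, loopB_oob body r i hi]
  | succ k ih =>
    intro i r hk hr
    by_cases hi : i < body.length
    · rcases hm : matchAt body i delegateNames with _ | j0
      · -- no name matches at i: A moves to i+1, B's search skips i
        have ht := tryNames_of_matchAt_none body i delegateNames hm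
        rw [loopA_none body r i hi ht, ih (i+1) r (by omega) hr]
        have hstep := findNext_step body i hi hm
        by_cases hi1 : i + 1 < body.length
        · rcases hf1 : findNext body (i+1) with _ | ⟨s, j0⟩
          · rw [loopB_none body r i hi (hstep.trans hf1),
                loopB_none body r (i+1) hi1 hf1]
          · by_cases hj : skipWs body j0 < body.length
            · by_cases hpar : body[skipWs body j0]'hj = '('
              · rw [loopB_hit body r i s j0 hi (hstep.trans hf1) hj hpar,
                    loopB_hit body r (i+1) s j0 hi1 hf1 hj hpar]
              · rw [loopB_miss_np body r i s j0 hi (hstep.trans hf1) hj hpar,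
                    loopB_miss_np body r (i+1) s j0 hi1 hf1 hj hpar]
            · rw [loopB_miss_oob body r i s j0 hi (hstep.trans hf1) hj,
                  loopB_miss_oob body r (i+1) s j0 hi1 hf1 hj]
        · rw [loopB_none body r i hi (hstep.trans (findNext_oob body (i+1) hi1)),
              loopB_oob body r (i+1) hi1]
      · -- a name matches at i with end j0: both sides consult the same j and paren test
        have ht := tryNames_of_matchAt_some body i delegateNames names_pairwise j0 hm
        have hfn := findNext_at body i hi j0 hm
        by_cases hj : skipWs body j0 < body.length
        · by_cases hpar : body[skipWs body j0]'hj = '('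
          · rw [dif_pos hj, if_pos hpar] at ht
            have hgt := tryNames_gt body i delegateNames (by decide) _ ht
            rw [loopA_some body r i _ hi ht,
                loopB_hit body r i i j0 hi hfn hj hpar,
                foldl_set_eq_splice _ r i (by omega)]
            have : i + (bpeAux body (skipWs body j0) 0 + 1 - i)
                = bpeAux body (skipWs body j0) 0 + 1 := by omega
            rw [this]
            exact ih _ _ (by omega) (by simp; omega)
          · rw [dif_pos hj, if_neg hpar] at ht
            rw [loopA_none body r i hi ht,
                loopB_miss_np body r i i j0 hi hfn hj hpar,
                ih (i+1) r (by omega) hr]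
        · rw [dif_neg hj] at ht
          rw [loopA_none body r i hi ht,
              loopB_miss_oob body r i i j0 hi hfn hj,
              ih (i+1) r (by omega) hr]
    · rw [loopA_oob body r i hi, loopB_oob body r i hi]

-- ===== VERDICT (by name: the statement is the Claim_ definition above) =====
theorem masked_body_py_spec : Claim_equal_masked_body_py := by
  intro body _
  unfold Spec_masked_body_py masked_body_py masked_body_py_alt
  rw [loop_eq body.toList body.toList.length 0 body.toList (by omega) rfl]
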